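-- pv_equiv track=rewrite | github.com/koii-network/prometheus-beta | src/smallest_sum.py | find_smallest_sum
-- ===== SOURCE A (Python) =====
-- def find_smallest_sum(list1, list2):
--     """
--     Find the smallest possible sum between two lists of integers.
--
--     Args:
--         list1 (list): First list of integers
--         list2 (list): Second list of integers
--
--     Returns:
--         int: The smallest possible sum
--
--     Raises:
--         ValueError: If either input is not a list or contains non-integer elements
--     """
--     # Validate inputs
--     if not isinstance(list1, list) or not isinstance(list2, list):
--         raise ValueError("Inputs must be lists")
--
--     # Check if lists are empty
--     if not list1 or not list2:
--         return 0
--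
--     # Validate that all elements are integers
--     if not all(isinstance(x, int) for x in list1 + list2):
--         raise ValueError("All list elements must be integers")
--
--     # Sort both lists
--     sorted_list1 = sorted(list1)
--     sorted_list2 = sorted(list2)
--
--     # Initialize minimum sum
--     min_sum = float('inf')
--
--     # Compare lists using two-pointer technique
--     i, j = 0, 0
--     while i < len(sorted_list1) and j < len(sorted_list2):
--         # Calculate current sum and update minimum sum if needed
--         current_sum = sorted_list1[i] + sorted_list2[j]
--         min_sum = min(min_sum, current_sum)
--
--         # Move the pointer of the list with the smaller value
--         if sorted_list1[i] < sorted_list2[j]: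
--             i += 1
--         else:
--             j += 1
--
--     return min_sum
-- ===== SOURCE B (Python) =====
-- def find_smallest_sum(list1, list2):
--     """Smallest possible sum of one element from each list (0 if either is empty)."""
--     if not isinstance(list1, list) or not isinstance(list2, list):
--         raise ValueError("Inputs must be lists")
--     if not list1 or not list2:
--         return 0
--     if not all(isinstance(x, int) for x in list1 + list2):
--         raise ValueError("All list elements must be integers")
--     # The smallest pair sum is simply the sum of the two minima.
--     return min(list1) + min(list2)
-- ===== Notes on version B (the rewrite author's own statement) =====
-- stated objective: faster
-- what changed: Replaces sort-both-lists plus two-pointer merge with the closed form min(list1)+min(list2), since the smallest pair sum is always the sum of the two minima.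
import Mathlib
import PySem

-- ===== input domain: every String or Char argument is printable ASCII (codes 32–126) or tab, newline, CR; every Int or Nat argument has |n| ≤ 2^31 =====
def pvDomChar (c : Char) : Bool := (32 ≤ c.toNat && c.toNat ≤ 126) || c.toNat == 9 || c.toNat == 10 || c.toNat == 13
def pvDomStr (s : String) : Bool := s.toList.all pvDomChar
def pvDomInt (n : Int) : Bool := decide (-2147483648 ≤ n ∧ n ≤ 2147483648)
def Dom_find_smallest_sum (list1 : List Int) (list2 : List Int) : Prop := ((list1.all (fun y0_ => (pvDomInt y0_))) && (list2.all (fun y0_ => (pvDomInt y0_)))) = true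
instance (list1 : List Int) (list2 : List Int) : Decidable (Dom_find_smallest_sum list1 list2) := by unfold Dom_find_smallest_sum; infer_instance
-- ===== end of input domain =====

-- B replaces A's sort + two-pointer scan by the closed form min(list1)+min(list2) (asymptotically faster).


-- ===== PORT A =====
-- min(min_sum, current_sum) with min_sum starting at float('inf'): none models inf
def pyMinInf (m : Option Int) (c : Int) : Option Int :=
  match m with
  | none => some c
  | some v => some (min v c)

-- the two-pointer while loop of A, step for step
def loopA (s1 s2 : List Int) (i j : Nat) (m : Option Int) : Option Int :=
  if i < s1.length ∧ j < s2.length then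
    let cur := s1.getD i 0 + s2.getD j 0   -- indices are in range here
    let m' := pyMinInf m cur
    if s1.getD i 0 < s2.getD j 0 then loopA s1 s2 (i+1) j m'
    else loopA s1 s2 i (j+1) m'
  else m
termination_by (s1.length - i) + (s2.length - j)
decreasing_by all_goals omega

def find_smallest_sum (list1 : List Int) (list2 : List Int) : Int :=
  if list1 = [] ∨ list2 = [] then 0
  else
    (loopA (PySem.List.sorted list1 (fun x => x) false)
           (PySem.List.sorted list2 (fun x => x) false) 0 0 none).getD 0
    -- both lists nonempty, so the loop runs at least once and min_sum is an int

-- ===== PORT B =====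
def find_smallest_sum_alt (list1 : List Int) (list2 : List Int) : Int :=
  if list1 = [] ∨ list2 = [] then 0
  else (PySem.List.min? list1 (fun x => x)).getD 0 + (PySem.List.min? list2 (fun x => x)).getD 0

-- ===== PRECONDITION & SPEC =====
def Spec_find_smallest_sum (list1 : List Int) (list2 : List Int) (out : Int) : Prop := out = find_smallest_sum_alt list1 list2
instance (list1 : List Int) (list2 : List Int) (out : Int) : Decidable (Spec_find_smallest_sum list1 list2 out) := by unfold Spec_find_smallest_sum; infer_instance

-- ===== CLAIM (what is proved, stated in full; the proofs are below) =====
def Claim_equal_find_smallest_sum : Prop := ∀ (list1 : List Int) (list2 : List Int), Dom_find_smallest_sum list1 list2 → Spec_find_smallest_sum list1 list2 (find_smallest_sum list1 list2)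

-- ===== LEMMAS AND PROOFS =====

-- Once min_sum = some m with m below every still-reachable pair sum, the loop returns some m.
theorem loopA_stay (s1 s2 : List Int) (i j : Nat) (m : Int)
    (hlo : ∀ k l, i ≤ k → k < s1.length → j ≤ l → l < s2.length →
        m ≤ s1.getD k 0 + s2.getD l 0) :
    loopA s1 s2 i j (some m) = some m := by
  generalize hfuel : (s1.length - i) + (s2.length - j) = n
  induction n generalizing i j with
  | zero =>
    unfold loopA
    rw [if_neg]; omega
  | succ n ih =>
    unfold loopA
    by_cases h : i < s1.length ∧ j < s2.length
    · rw [if_pos h]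
      have hcur : m ≤ s1[i]?.getD 0 + s2[j]?.getD 0 := by
        simpa [List.getD] using hlo i j le_rfl h.1 le_rfl h.2
      have hm : pyMinInf (some m) (s1.getD i 0 + s2.getD j 0) = some m := by
        simp [pyMinInf, List.getD, min_eq_left hcur]
      split_ifs with hc
      · simp only [hm]
        exact ih (i+1) j (fun k l hk hkl hl hll => hlo k l (by omega) hkl hl hll) (by omega)
      · simp only [hm]
        exact ih i (j+1) (fun k l hk hkl hl hll => hlo k l hk hkl (by omega) hll) (by omega)
    · rw [if_neg h]

-- On sorted nonempty lists the loop returns the sum of the two heads.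
theorem loopA_sorted (a b : Int) (t1 t2 : List Int) (l1 l2 : List Int)
    (h1 : PySem.List.sorted l1 (fun x => x) false = a :: t1)
    (h2 : PySem.List.sorted l2 (fun x => x) false = b :: t2) :
    loopA (a :: t1) (b :: t2) 0 0 none = some (a + b) := by
  have ha : ∀ y ∈ l1, a ≤ y := PySem.List.key_head_sorted_le l1 (fun x => x) h1
  have hb : ∀ y ∈ l2, b ≤ y := PySem.List.key_head_sorted_le l2 (fun x => x) h2
  have hmem1 : ∀ k, k < (a :: t1).length → (a :: t1).getD k 0 ∈ l1 := by
    intro k hk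
    have hmem : (a :: t1).getD k 0 ∈ (a :: t1) := by
      rw [List.getD_eq_getElem _ _ hk]; exact List.getElem_mem hk
    exact (PySem.List.mem_sorted l1 (fun x => x) false _).1 (by rw [h1]; exact hmem)
  have hmem2 : ∀ k, k < (b :: t2).length → (b :: t2).getD k 0 ∈ l2 := by
    intro k hk
    have hmem : (b :: t2).getD k 0 ∈ (b :: t2) := by
      rw [List.getD_eq_getElem _ _ hk]; exact List.getElem_mem hk
    exact (PySem.List.mem_sorted l2 (fun x => x) false _).1 (by rw [h2]; exact hmem)
  have hlo : ∀ k l, k < (a :: t1).length → l < (b :: t2).length →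
      a + b ≤ (a :: t1).getD k 0 + (b :: t2).getD l 0 := by
    intro k l hk hl
    have := ha _ (hmem1 k hk)
    have := hb _ (hmem2 l hl)
    omega
  unfold loopA
  rw [if_pos (by simp)]
  have hm : pyMinInf none ((a :: t1).getD 0 0 + (b :: t2).getD 0 0) = some (a + b) := by
    simp [pyMinInf]
  split_ifs with hc
  · simp only [hm]
    exact loopA_stay _ _ _ _ _ (fun k l hk hkl hl hll => hlo k l hkl hll)
  · simp only [hm]
    exact loopA_stay _ _ _ _ _ (fun k l hk hkl hl hll => hlo k l hkl hll)

-- The head of sorted(l) is min(l).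
theorem head_sorted_eq_min (l : List Int) (a : Int) (t : List Int)
    (h : PySem.List.sorted l (fun x => x) false = a :: t) :
    PySem.List.min? l (fun x => x) = some a := by
  have hne : l ≠ [] := by
    intro he; rw [he] at h; simp [PySem.List.sorted] at h
  obtain ⟨m, hm⟩ : ∃ m, PySem.List.min? l (fun x => x) = some m := by
    cases hmin : PySem.List.min? l (fun x => x) with
    | none => exact absurd ((PySem.List.min?_eq_none_iff _ _).1 hmin) hne
    | some m => exact ⟨m, rfl⟩
  have hmemm : m ∈ l := PySem.List.min?_mem hm
  have hamem : a ∈ l := by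
    have : a ∈ (a :: t) := List.mem_cons_self
    rw [← h] at this
    exact (PySem.List.mem_sorted _ _ _ _).1 this
  have h1 : a ≤ m := PySem.List.key_head_sorted_le l (fun x => x) h m hmemm
  have h2 : m ≤ a := PySem.List.min?_isMin hm a hamem
  rw [hm]
  congr 1
  omega

-- ===== VERDICT (by name: the statement is the Claim_ definition above) =====
theorem find_smallest_sum_spec : Claim_equal_find_smallest_sum := by
  intro l1 l2 _
  unfold Spec_find_smallest_sum find_smallest_sum find_smallest_sum_alt
  by_cases h : l1 = [] ∨ l2 = []
  · rw [if_pos h, if_pos h]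
  · rw [if_neg h, if_neg h]
    push Not at h
    obtain ⟨h1, h2⟩ := h
    obtain ⟨a, t1, hs1⟩ : ∃ a t1, PySem.List.sorted l1 (fun x => x) false = a :: t1 := by
      cases hs : PySem.List.sorted l1 (fun x => x) false with
      | nil => exact absurd ((PySem.List.sorted_eq_nil_iff _ _ _).1 hs) h1
      | cons a t => exact ⟨a, t, rfl⟩
    obtain ⟨b, t2, hs2⟩ : ∃ b t2, PySem.List.sorted l2 (fun x => x) false = b :: t2 := by
      cases hs : PySem.List.sorted l2 (fun x => x) false with
      | nil => exact absurd ((PySem.List.sorted_eq_nil_iff _ _ _).1 hs) h2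
      | cons b t => exact ⟨b, t, rfl⟩
    rw [hs1, hs2, loopA_sorted a b t1 t2 l1 l2 hs1 hs2,
        head_sorted_eq_min l1 a t1 hs1, head_sorted_eq_min l2 b t2 hs2]
    rfl
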